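-- pv_equiv track=rewrite | github.com/jetnew/UCSD-Data-Structures-and-Algorithms | Course 1 - Algorithm Toolbox/Solutions/fibonacci_partial_sum.py | len_period
-- ===== SOURCE A (Python) =====
-- def fib(n):
--     l = [0, 1]
--     for i in range(n-1):
--         l.append(l[-1] + l[-2])
--     return l[-1]
--
-- def len_period(m):
--     l = []
--     i = 2
--     while l[-2:] != [0, 1]:
--         l.append(fib(i) % m)
--         i += 1
--     l = [0, 1] + l[:-2]
--     return len(l)
-- ===== SOURCE B (Python) =====
-- def len_period(m):
--     # Iterate Fibonacci residue pairs mod m incrementally; stop when the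
--     # pair returns to (0, 1): that index is the Pisano period.
--     a, b, n = 1, 1 % m, 1
--     while (a, b) != (0, 1):
--         a, b = b, (a + b) % m
--         n += 1
--     return n
-- ===== Notes on version B (the rewrite author's own statement) =====
-- stated objective: faster
-- what changed: Instead of recomputing the n-th Fibonacci number from scratch with a growing big-int list at every loop step and keeping all residues in a list, B iterates the pair of Fibonacci residues mod m incrementally and counts steps until the pair returns to its start; Pre_ excludes the moduli below two, where A raises ZeroDivisionError (m = 0) or never terminates, exactly as B does.
-- outside the precondition, e.g. on len_period(0): A raises ZeroDivisionError, B raises ZeroDivisionError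
import Mathlib
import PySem

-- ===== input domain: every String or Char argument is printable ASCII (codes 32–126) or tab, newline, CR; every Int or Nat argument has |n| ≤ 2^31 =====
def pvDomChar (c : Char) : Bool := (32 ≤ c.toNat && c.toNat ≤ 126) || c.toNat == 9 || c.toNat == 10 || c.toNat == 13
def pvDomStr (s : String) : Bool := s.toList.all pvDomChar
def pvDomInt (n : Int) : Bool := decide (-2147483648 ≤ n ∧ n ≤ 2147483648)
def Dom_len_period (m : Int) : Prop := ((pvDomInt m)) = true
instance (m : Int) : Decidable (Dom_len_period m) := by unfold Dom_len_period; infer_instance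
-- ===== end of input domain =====

-- B replaces A's per-step from-scratch big-int Fibonacci recomputation by one incremental
-- pass over Fibonacci residue pairs mod m (asymptotically faster; measured by the check).


-- ===== PORT A =====
-- one body iteration of fib's list loop: l.append(l[-1] + l[-2]); l always has ≥ 2
-- elements, so the pyGet? calls never miss and `.getD 0` is unreachable
def pvStep (l : List Int) : List Int :=
  l ++ [((PySem.List.pyGet? l (-1)).getD 0) + ((PySem.List.pyGet? l (-2)).getD 0)]

-- A's fib: build [0,1], append l[-1]+l[-2] for i in range(n-1), return l[-1]
def pvFib (n : Int) : Int :=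
  let l := (PySem.List.pyRange 0 (n - 1) 1).foldl (fun l _ => pvStep l) [0, 1]
  (PySem.List.pyGet? l (-1)).getD 0

-- A's while loop, totalized by fuel (the fuel chosen in len_period suffices on Pre_)
def pvLoopA (m : Int) (fuel : Nat) (l : List Int) (i : Int) : List Int :=
  match fuel with
  | 0 => l
  | f + 1 =>
    if PySem.List.slice l (some (-2)) none ≠ ([0, 1] : List Int) then
      pvLoopA m f (l ++ [PySem.Int.mod (pvFib i) m]) (i + 1)
    else l

def len_period (m : Int) : Int :=
  let l := pvLoopA m (6 * m + 13).toNat [] 2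
  let l2 := ([0, 1] : List Int) ++ PySem.List.slice l none (some (-2))
  (l2.length : Int)

-- ===== PORT B =====
-- B's while loop, totalized by fuel (the fuel chosen in len_period_alt suffices on Pre_)
def pvLoopB (m : Int) (fuel : Nat) (a b n : Int) : Int :=
  match fuel with
  | 0 => n
  | f + 1 =>
    if (a, b) ≠ ((0 : Int), (1 : Int)) then
      pvLoopB m f b (PySem.Int.mod (a + b) m) (n + 1)
    else n

def len_period_alt (m : Int) : Int :=
  pvLoopB m (6 * m + 12).toNat 1 (PySem.Int.mod 1 m) 1

-- ===== PRECONDITION & SPEC =====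
-- Pre_ excludes exactly the inputs on which A never returns: m = 0 (ZeroDivisionError in
-- fib(i) % m) and m = 1 or m < 0 (the residues never reach the pair (0,1): infinite loop)
def Pre_len_period (m : Int) : Prop := 2 ≤ m
instance (m : Int) : Decidable (Pre_len_period m) := by unfold Pre_len_period; infer_instance
def pvWitness_len_period : Int := 5

def Spec_len_period (m : Int) (out : Int) : Prop := out = len_period_alt m
instance (m : Int) (out : Int) : Decidable (Spec_len_period m out) := by unfold Spec_len_period; infer_instance

-- ===== CLAIM (what is proved, stated in full; the proofs are below) =====
def Claim_equal_len_period : Prop := ∀ (m : Int), Dom_len_period m → Pre_len_period m → Spec_len_period m (len_period m)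

-- ===== LEMMAS AND PROOFS =====

-- mathematical Fibonacci, the yardstick both loops are measured against
def fibI : Nat → Int
  | 0 => 0
  | 1 => 1
  | n + 2 => fibI n + fibI (n + 1)

theorem foldl_const_iterate {α β : Type} (g : α → α) (xs : List β) (init : α) :
    xs.foldl (fun l _ => g l) init = g^[xs.length] init := by
  induction xs generalizing init with
  | nil => rfl
  | cons x xs ih => simp [List.foldl_cons, ih, Function.iterate_succ_apply]

theorem pvStep_last2 (l' : List Int) (x y : Int) :
    pvStep (l' ++ [x, y]) = (l' ++ [x]) ++ [y, x + y] := by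
  have h1 : PySem.List.pyGet? (l' ++ [x, y]) (-1) = some y := by
    rw [PySem.List.pyGet?_neg_one]
    simp
  have h2 : PySem.List.pyGet? (l' ++ [x, y]) (-2) = some x := by
    rw [PySem.List.pyGet?_neg_ofNat _ 2 (by omega) (by simp)]
    simp
  simp [pvStep, h1, h2]
  ring

theorem iter_shape (t : Nat) :
    ∃ l' : List Int, pvStep^[t] [0, 1] = l' ++ [fibI t, fibI (t + 1)] := by
  induction t with
  | zero => exact ⟨[], by simp [fibI]⟩
  | succ t ih =>
    obtain ⟨l', hl⟩ := ih
    refine ⟨l' ++ [fibI t], ?_⟩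
    rw [Function.iterate_succ_apply', hl, pvStep_last2]
    have : fibI (t + 2) = fibI t + fibI (t + 1) := rfl
    simp [this]

theorem pvFib_eq (k : Nat) (hk : 1 ≤ k) : pvFib (k : Int) = fibI k := by
  obtain ⟨l', hl⟩ := iter_shape (k - 1)
  have hlen : (PySem.List.pyRange 0 ((k : Int) - 1) 1).length = k - 1 := by
    rw [PySem.List.length_pyRange_one]; omega
  have hfold : (PySem.List.pyRange 0 ((k : Int) - 1) 1).foldl (fun l _ => pvStep l) [0, 1]
      = l' ++ [fibI (k - 1), fibI (k - 1 + 1)] := by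
    rw [foldl_const_iterate, hlen, hl]
  have hk1 : k - 1 + 1 = k := by omega
  simp only [pvFib, hfold, hk1]
  rw [PySem.List.pyGet?_neg_one]
  simp

theorem modm_add (m x y : Int) (hm : 0 < m) :
    PySem.Int.mod (PySem.Int.mod x m + PySem.Int.mod y m) m = PySem.Int.mod (x + y) m := by
  rw [PySem.Int.mod_eq_emod_of_pos hm, PySem.Int.mod_eq_emod_of_pos hm,
    PySem.Int.mod_eq_emod_of_pos hm, PySem.Int.mod_eq_emod_of_pos hm, ← Int.add_emod]

theorem slice_last2 (l' : List Int) (x y : Int) :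
    PySem.List.slice (l' ++ [x, y]) (some (-2)) none = [x, y] := by
  rw [PySem.List.slice_from_neg_ofNat _ 2 (by omega)]
  simp

-- the value A returns once the loop has exited with list l (len([0,1] + l[:-2]))
def resA (l : List Int) : Int :=
  ((([0, 1] : List Int) ++ PySem.List.slice l none (some (-2))).length : Int)

theorem resA_eq (l : List Int) (h : 2 ≤ l.length) : resA l = (l.length : Int) := by
  unfold resA
  rw [PySem.List.slice_to_neg_ofNat _ 2 (by omega)]
  simp
  omega

theorem loop_corr (m : Int) (hm : 0 < m) :
    ∀ (F : Nat) (j : Nat) (l' : List Int), 2 ≤ j → l'.length + 2 = j →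
    resA (pvLoopA m F
        (l' ++ [PySem.Int.mod (fibI j) m, PySem.Int.mod (fibI (j + 1)) m]) ((j : Int) + 2))
      = pvLoopB m F (PySem.Int.mod (fibI j) m) (PySem.Int.mod (fibI (j + 1)) m) (j : Int) := by
  intro F
  induction F with
  | zero =>
    intro j l' hj hlen
    simp only [pvLoopA, pvLoopB]
    rw [resA_eq _ (by simp)]
    simp
    omega
  | succ F ih =>
    intro j l' hj hlen
    simp only [pvLoopA, pvLoopB, slice_last2]
    by_cases hc : PySem.Int.mod (fibI j) m = 0 ∧ PySem.Int.mod (fibI (j + 1)) m = 1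
    · rw [if_neg (by simp [hc.1, hc.2]), if_neg (by simp [hc.1, hc.2])]
      rw [resA_eq _ (by simp)]
      simp
      omega
    · have hA : ([PySem.Int.mod (fibI j) m, PySem.Int.mod (fibI (j + 1)) m] : List Int)
          ≠ [0, 1] := by
        intro h; exact hc ⟨by injection h, by injection h with _ h2; injection h2⟩
      rw [if_pos hA,
        if_pos (by simp [Prod.ext_iff]; intro h1 h2; exact hc ⟨h1, h2⟩)]
      have hfib : pvFib ((j : Int) + 2) = fibI (j + 2) := by
        have : ((j : Int) + 2) = ((j + 2 : Nat) : Int) := by push_cast; ring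
        rw [this, pvFib_eq (j + 2) (by omega)]
      have hmod : PySem.Int.mod
          (PySem.Int.mod (fibI j) m + PySem.Int.mod (fibI (j + 1)) m) m
          = PySem.Int.mod (fibI (j + 2)) m := by
        rw [modm_add m _ _ hm]; rfl
      have hlist :
          (l' ++ [PySem.Int.mod (fibI j) m, PySem.Int.mod (fibI (j + 1)) m])
              ++ [PySem.Int.mod (fibI (j + 2)) m]
            = (l' ++ [PySem.Int.mod (fibI j) m])
              ++ [PySem.Int.mod (fibI (j + 1)) m, PySem.Int.mod (fibI (j + 2)) m] := by
        simp
      have hcast : (j : Int) + 2 + 1 = ((j + 1 : Nat) : Int) + 2 := by push_cast; ring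
      rw [hfib, hmod, hlist, hcast]
      have := ih (j + 1) (l' ++ [PySem.Int.mod (fibI j) m]) (by omega) (by simp; omega)
      have hj1 : ((j : Nat) + 1 : Nat) + 1 = j + 2 := rfl
      rw [hj1] at this
      rw [this]
      push_cast
      ring_nf

-- ===== VERDICT (by name: the statement is the Claim_ definition above) =====
theorem len_period_spec : Claim_equal_len_period := by
  intro m _ hm
  unfold Spec_len_period
  have hm0 : 0 < m := by unfold Pre_len_period at hm; omega
  -- unfold the first two iterations of A's loop and the first iteration of B's loop
  set F : Nat := (6 * m + 11).toNat with hF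
  have hFA : (6 * m + 13).toNat = F + 2 := by unfold Pre_len_period at hm; omega
  have hFB : (6 * m + 12).toNat = F + 1 := by unfold Pre_len_period at hm; omega
  have hfib2 : pvFib 2 = 1 := by decide
  have hfib3 : pvFib 3 = 2 := by decide
  -- A side: len_period m = resA (pvLoopA m (F+2) [] 2)
  have hA : len_period m = resA (pvLoopA m (F + 2) [] 2) := by
    simp only [len_period, resA, hFA]
  have hsl : PySem.List.slice ([] : List Int) (some (-2)) none = [] := by
    rw [PySem.List.slice_from_neg_ofNat ([] : List Int) 2 (by omega)]
    simp
  have hstep1 : pvLoopA m (F + 2) [] 2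
      = pvLoopA m (F + 1) [PySem.Int.mod 1 m] 3 := by
    simp only [pvLoopA]
    rw [if_pos (by rw [hsl]; simp)]
    simp [hfib2]
  have hstep2' : pvLoopA m (F + 1) [PySem.Int.mod 1 m] 3
      = pvLoopA m F [PySem.Int.mod 1 m, PySem.Int.mod 2 m] 4 := by
    simp only [pvLoopA]
    rw [if_pos]
    · simp [hfib3]
    · rw [PySem.List.slice_from_neg_ofNat _ 2 (by omega)]
      intro h
      have := congrArg List.length h
      simp at this
  -- B side: one step
  have hB : len_period_alt m
      = pvLoopB m F (PySem.Int.mod 1 m)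
          (PySem.Int.mod (1 + PySem.Int.mod 1 m) m) 2 := by
    simp only [len_period_alt, hFB, pvLoopB]
    rw [if_pos (by simp [Prod.ext_iff])]
    norm_num
  have hmod2 : PySem.Int.mod (1 + PySem.Int.mod 1 m) m = PySem.Int.mod 2 m := by
    rw [PySem.Int.mod_eq_emod_of_pos hm0, PySem.Int.mod_eq_emod_of_pos hm0,
      PySem.Int.mod_eq_emod_of_pos hm0, Int.add_emod_emod]
    norm_num
  rw [hA, hstep1, hstep2', hB, hmod2]
  have hcore := loop_corr m hm0 F 2 [] (by omega) (by simp)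
  have e2 : fibI 2 = 1 := by decide
  have e3 : fibI 3 = 2 := by decide
  rw [e2, e3] at hcore
  simpa using hcore
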